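-- pv_equiv track=rewrite | github.com/ayoubc/competitive-programming | online_judges/kattis/neighborhoodwatch.py | solve
-- ===== SOURCE A (Python) =====
-- def solve(n, k, h):
--     unsafe = []
--     for i in range(k):
--         if i == 0:
--             unsafe.append(h[i] - 1)
--         else:
--             unsafe.append(h[i] - h[i - 1] - 1)
--
--         if i == k-1:
--             unsafe.append(n - h[-1])
--
--     squqres = 0
--     sum = 0
--     for val in unsafe:
--         sum += val
--         squqres += val * val
--     return (sum ** 2 - squqres)//2 + k + k * (k - 1) // 2 + k * (n - k)
-- ===== SOURCE B (Python) =====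
-- def solve(n, k, h):
--     # One fused pass: running prefix sum S of gaps and cross accumulator C,
--     # so C ends up as sum_{i<j} g_i*g_j with no squares and no halving.
--     S = 0
--     C = 0
--     for i in range(k):
--         g = h[i] - 1 if i == 0 else h[i] - h[i - 1] - 1
--         C += g * S
--         S += g
--         if i == k - 1:
--             g2 = n - h[-1]
--             C += g2 * S
--             S += g2
--     return C + k + k * (k - 1) // 2 + k * (n - k)
-- ===== Notes on version B (the rewrite author's own statement) =====
-- stated objective: alternative
-- what changed: Replaces the two-pass sum/sum-of-squares computation with (S^2-Q)//2 by a single fused pass that maintains a running prefix sum and a cross-product accumulator, obtaining the pair count directly without squaring or dividing.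
-- outside the precondition, e.g. on solve(5, 3, [2, 4]): A raises IndexError, B raises IndexError
import Mathlib
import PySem

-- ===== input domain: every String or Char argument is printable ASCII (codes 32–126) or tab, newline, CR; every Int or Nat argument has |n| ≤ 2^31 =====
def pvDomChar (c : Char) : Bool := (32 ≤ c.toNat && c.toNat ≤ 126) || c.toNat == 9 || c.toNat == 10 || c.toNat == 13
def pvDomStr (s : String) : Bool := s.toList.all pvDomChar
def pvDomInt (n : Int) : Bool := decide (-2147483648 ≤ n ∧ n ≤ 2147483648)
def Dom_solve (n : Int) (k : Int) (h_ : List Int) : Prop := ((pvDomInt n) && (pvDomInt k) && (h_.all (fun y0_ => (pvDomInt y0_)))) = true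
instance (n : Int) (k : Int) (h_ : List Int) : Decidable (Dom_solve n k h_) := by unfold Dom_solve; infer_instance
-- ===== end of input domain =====

-- B fuses A's gap list + two accumulators into one pass with a prefix sum and a cross accumulator, avoiding the square and the halving (objective: alternative).

-- ===== PORT A =====
def solve (n : Int) (k : Int) (h_ : List Int) : Int :=
  let uns : List Int := (PySem.List.pyRange 0 k 1).foldl (fun acc i =>
    let acc := if i == 0 then acc ++ [PySem.List.pyGetD h_ i 0 - 1]
               else acc ++ [PySem.List.pyGetD h_ i 0 - PySem.List.pyGetD h_ (i - 1) 0 - 1]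
    if i == k - 1 then acc ++ [n - PySem.List.pyGetD h_ (-1) 0] else acc) []
  let p := uns.foldl (fun (p : Int × Int) val => (p.1 + val, p.2 + val * val)) (0, 0)
  PySem.Int.floordiv (p.1 ^ 2 - p.2) 2 + k + PySem.Int.floordiv (k * (k - 1)) 2 + k * (n - k)

-- ===== PORT B =====
def solve_alt (n : Int) (k : Int) (h_ : List Int) : Int :=
  let st := (PySem.List.pyRange 0 k 1).foldl (fun (st : Int × Int) i =>
    let g := if i == 0 then PySem.List.pyGetD h_ i 0 - 1
             else PySem.List.pyGetD h_ i 0 - PySem.List.pyGetD h_ (i - 1) 0 - 1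
    let st := (st.1 + g, st.2 + g * st.1)
    if i == k - 1 then
      let g2 := n - PySem.List.pyGetD h_ (-1) 0
      (st.1 + g2, st.2 + g2 * st.1)
    else st) ((0 : Int), (0 : Int))
  st.2 + k + PySem.Int.floordiv (k * (k - 1)) 2 + k * (n - k)

-- ===== PRECONDITION & SPEC =====
-- Pre_ excludes exactly the inputs where Python A raises IndexError: 1 ≤ k but h has fewer than k elements (h[i] / h[-1] out of range).
def Pre_solve (n : Int) (k : Int) (h_ : List Int) : Prop := k ≤ (h_.length : Int) ∨ k ≤ 0
instance (n : Int) (k : Int) (h_ : List Int) : Decidable (Pre_solve n k h_) := by unfold Pre_solve; infer_instance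
def pvWitness_solve : Int × Int × List Int := (10, 2, [2, 5])
def Spec_solve (n : Int) (k : Int) (h_ : List Int) (out : Int) : Prop := out = solve_alt n k h_
instance (n : Int) (k : Int) (h_ : List Int) (out : Int) : Decidable (Spec_solve n k h_ out) := by unfold Spec_solve; infer_instance

-- ===== CLAIM (what is proved, stated in full; the proofs are below) =====
def Claim_equal_solve : Prop := ∀ (n : Int) (k : Int) (h_ : List Int), Dom_solve n k h_ → Pre_solve n k h_ → Spec_solve n k h_ (solve n k h_)

-- ===== LEMMAS AND PROOFS =====

-- the gaps contributed at loop index i (both loops produce exactly these, in order)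
def gapsAt (n : Int) (k : Int) (h_ : List Int) (i : Int) : List Int :=
  (if i == 0 then [PySem.List.pyGetD h_ i 0 - 1]
   else [PySem.List.pyGetD h_ i 0 - PySem.List.pyGetD h_ (i - 1) 0 - 1]) ++
  (if i == k - 1 then [n - PySem.List.pyGetD h_ (-1) 0] else [])

theorem a_step_eq (n k : Int) (h_ : List Int) (acc : List Int) (i : Int) :
    (let acc := if i == 0 then acc ++ [PySem.List.pyGetD h_ i 0 - 1]
                else acc ++ [PySem.List.pyGetD h_ i 0 - PySem.List.pyGetD h_ (i - 1) 0 - 1]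
     if i == k - 1 then acc ++ [n - PySem.List.pyGetD h_ (-1) 0] else acc)
    = acc ++ gapsAt n k h_ i := by
  simp only [gapsAt]; split_ifs <;> simp

theorem b_step_eq (n k : Int) (h_ : List Int) (st : Int × Int) (i : Int) :
    (let g := if i == 0 then PySem.List.pyGetD h_ i 0 - 1
              else PySem.List.pyGetD h_ i 0 - PySem.List.pyGetD h_ (i - 1) 0 - 1
     let st := (st.1 + g, st.2 + g * st.1)
     if i == k - 1 then
       let g2 := n - PySem.List.pyGetD h_ (-1) 0
       (st.1 + g2, st.2 + g2 * st.1)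
     else st)
    = (gapsAt n k h_ i).foldl (fun (st : Int × Int) g => (st.1 + g, st.2 + g * st.1)) st := by
  simp only [gapsAt]; split_ifs <;> simp [List.foldl]

theorem foldl_flatMap' {α β : Type} (g : α → List Int) (f : β → Int → β) (l : List α) (init : β) :
    (l.flatMap g).foldl f init = l.foldl (fun st x => (g x).foldl f st) init := by
  induction l generalizing init with
  | nil => rfl
  | cons x xs ih => simp [List.flatMap_cons, List.foldl_append, ih]

theorem key (L : List Int) (S Q C : Int) (h : S ^ 2 = 2 * C + Q) :
    (L.foldl (fun (st : Int × Int) g => (st.1 + g, st.2 + g * st.1)) (S, C)).1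
      = (L.foldl (fun (p : Int × Int) v => (p.1 + v, p.2 + v * v)) (S, Q)).1 ∧
    (L.foldl (fun (p : Int × Int) v => (p.1 + v, p.2 + v * v)) (S, Q)).1 ^ 2
      = 2 * (L.foldl (fun (st : Int × Int) g => (st.1 + g, st.2 + g * st.1)) (S, C)).2
        + (L.foldl (fun (p : Int × Int) v => (p.1 + v, p.2 + v * v)) (S, Q)).2 := by
  induction L generalizing S Q C with
  | nil => exact ⟨rfl, h⟩
  | cons v L ih =>
      simp only [List.foldl_cons]
      exact ih (S + v) (Q + v * v) (C + v * S) (by ring_nf; linarith [h])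

-- ===== VERDICT (by name: the statement is the Claim_ definition above) =====
theorem solve_spec : Claim_equal_solve := by
  intro n k h_ _ _
  show solve n k h_ = solve_alt n k h_
  unfold solve solve_alt
  rw [show (fun (acc : List Int) (i : Int) =>
      let acc := if i == 0 then acc ++ [PySem.List.pyGetD h_ i 0 - 1]
                 else acc ++ [PySem.List.pyGetD h_ i 0 - PySem.List.pyGetD h_ (i - 1) 0 - 1]
      if i == k - 1 then acc ++ [n - PySem.List.pyGetD h_ (-1) 0] else acc)
      = (fun (acc : List Int) (i : Int) => acc ++ gapsAt n k h_ i) from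
      funext fun acc => funext fun i => a_step_eq n k h_ acc i]
  rw [show (fun (st : Int × Int) (i : Int) =>
      let g := if i == 0 then PySem.List.pyGetD h_ i 0 - 1
               else PySem.List.pyGetD h_ i 0 - PySem.List.pyGetD h_ (i - 1) 0 - 1
      let st := (st.1 + g, st.2 + g * st.1)
      if i == k - 1 then
        let g2 := n - PySem.List.pyGetD h_ (-1) 0
        (st.1 + g2, st.2 + g2 * st.1)
      else st)
      = (fun (st : Int × Int) (i : Int) =>
          (gapsAt n k h_ i).foldl (fun (st : Int × Int) g => (st.1 + g, st.2 + g * st.1)) st) from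
      funext fun st => funext fun i => b_step_eq n k h_ st i]
  rw [show (PySem.List.pyRange 0 k 1).foldl (fun (acc : List Int) (i : Int) => acc ++ gapsAt n k h_ i) []
      = (PySem.List.pyRange 0 k 1).flatMap (gapsAt n k h_) by
        simpa using PySem.List.foldl_append_eq_flatMap (gapsAt n k h_) (PySem.List.pyRange 0 k 1) []]
  rw [← foldl_flatMap' (gapsAt n k h_) (fun (st : Int × Int) g => (st.1 + g, st.2 + g * st.1))
        (PySem.List.pyRange 0 k 1) ((0 : Int), (0 : Int))]
  set L := (PySem.List.pyRange 0 k 1).flatMap (gapsAt n k h_) with hL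
  obtain ⟨h1, h2⟩ := key L 0 0 0 (by ring)
  set p := L.foldl (fun (p : Int × Int) v => (p.1 + v, p.2 + v * v)) ((0 : Int), (0 : Int)) with hp
  set q := L.foldl (fun (st : Int × Int) g => (st.1 + g, st.2 + g * st.1)) ((0 : Int), (0 : Int)) with hq
  have h3 : p.1 ^ 2 - p.2 = 2 * q.2 := by linarith [h2]
  show PySem.Int.floordiv (p.1 ^ 2 - p.2) 2 + k + PySem.Int.floordiv (k * (k - 1)) 2 + k * (n - k)
      = q.2 + k + PySem.Int.floordiv (k * (k - 1)) 2 + k * (n - k)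
  rw [h3, PySem.Int.floordiv_eq_ediv_of_pos (by norm_num)]
  omega
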